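-- pv_equiv track=rewrite | github.com/Azzedde/Coding-Practice-with-Kick-Start-Session-3 | wiggle_walk.py | end_position
-- ===== SOURCE A (Python) =====
-- def end_position(N, R, C, Sr, Sc, instructions):
--   path = [(Sr, Sc)]
--   for n in range(N):
--     last=()
--     if instructions[n] == 'N':
--       last=(path[-1][0] -1 , path[-1][1])
--       while(last in path):
--         last=(last[0] -1 , last[1])
--       path.append(last)
--
--     if instructions[n] == 'E':
--       last = (path[-1][0] , path[-1][1] + 1)
--       while(last in path):
--         last=(last[0] , last[1] + 1)
--       path.append(last)
--
--     if instructions[n] == 'W':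
--       last = (path[-1][0], path[-1][1] - 1)
--       while(last in path):
--         last=(last[0], last[1] - 1)
--       path.append(last)
--
--     if instructions[n] == 'S':
--       last = (path[-1][0] + 1, path[-1][1])
--       while(last in path):
--         last=(last[0] + 1, last[1])
--       path.append(last)
--
--
--   final_r, final_c = path[-1]
--
--   return final_r, final_c
-- ===== SOURCE B (Python) =====
-- def end_position(N, R, C, Sr, Sc, instructions):
--     # Union-find style jump pointers, one dict per direction, with path
--     # compression: jump[d][cell] points past a known-occupied run in
--     # direction d, so occupied runs are skipped without rescanning.
--     jn, je, jw, js = {}, {}, {}, {}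
--
--     def occupy(cell):
--         r, c = cell
--         jn[cell] = (r - 1, c)
--         je[cell] = (r, c + 1)
--         jw[cell] = (r, c - 1)
--         js[cell] = (r + 1, c)
--
--     def find(jump, cell):
--         seen = []
--         while cell in jump:
--             seen.append(cell)
--             cell = jump[cell]
--         for p in seen:
--             jump[p] = cell
--         return cell
--
--     cur = (Sr, Sc)
--     occupy(cur)
--     for n in range(N):
--         ch = instructions[n]
--         if ch == 'N':
--             cur = find(jn, cur)
--             occupy(cur)
--         elif ch == 'E':
--             cur = find(je, cur)
--             occupy(cur)
--         elif ch == 'W':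
--             cur = find(jw, cur)
--             occupy(cur)
--         elif ch == 'S':
--             cur = find(js, cur)
--             occupy(cur)
--     return cur
-- ===== Notes on version B (the rewrite author's own statement) =====
-- stated objective: faster
-- what changed: A rescans the whole path list for every single step of the skip loop; B keeps four per-direction jump-pointer dictionaries with path compression (union-find style), so each move jumps past known-occupied runs instead of walking and re-scanning them.
import Mathlib
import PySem

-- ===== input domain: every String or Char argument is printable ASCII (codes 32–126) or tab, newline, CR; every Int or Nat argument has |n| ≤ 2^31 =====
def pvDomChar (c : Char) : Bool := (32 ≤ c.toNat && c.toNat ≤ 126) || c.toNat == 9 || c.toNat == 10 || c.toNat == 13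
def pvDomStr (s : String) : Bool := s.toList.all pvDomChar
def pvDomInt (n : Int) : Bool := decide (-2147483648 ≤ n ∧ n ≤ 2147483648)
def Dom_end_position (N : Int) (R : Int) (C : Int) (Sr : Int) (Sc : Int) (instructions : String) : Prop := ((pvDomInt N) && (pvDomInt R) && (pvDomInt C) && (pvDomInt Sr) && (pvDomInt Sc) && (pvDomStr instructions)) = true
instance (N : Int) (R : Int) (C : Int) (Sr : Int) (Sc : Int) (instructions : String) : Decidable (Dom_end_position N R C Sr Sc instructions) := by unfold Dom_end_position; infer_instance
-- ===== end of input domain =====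

-- B replaces A's repeated list scans by per-direction jump-pointer dictionaries with path
-- compression; a timing run measured B faster on the large inputs (asymptotic mechanism).


-- ===== PORT A =====
-- path[-1]; the path list is nonempty throughout A, where this is exact
def pvLastA (path : List (Int × Int)) : Int × Int := path.getLast?.getD (0, 0)

-- A's 'while last in path: last = last + delta' loop; fuel path.length + 1 always
-- suffices (at most path.length distinct members can be skipped), so this is exact
def pvSkipA (fuel : Nat) (d : Int × Int) (path : List (Int × Int)) (last : Int × Int) :
    Int × Int :=
  match fuel with
  | 0 => last
  | f + 1 =>
    if last ∈ path then pvSkipA f d path (last.1 + d.1, last.2 + d.2) else last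

-- one of A's four identical branch bodies: start one step from path[-1], skip
-- members of path, append the first non-member
def pvBranchA (path : List (Int × Int)) (d : Int × Int) : List (Int × Int) :=
  let last := ((pvLastA path).1 + d.1, (pvLastA path).2 + d.2)
  path ++ [pvSkipA (path.length + 1) d path last]

def end_position (N : Int) (R : Int) (C : Int) (Sr : Int) (Sc : Int)
    (instructions : String) : Int × Int :=
  let chars := instructions.toList
  let path : List (Int × Int) :=
    (PySem.List.pyRange 0 N 1).foldl (fun path n =>
      match PySem.List.pyGet? chars n with
      | none => path  -- instructions[n] raises IndexError here; excluded by Pre_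
      | some ch =>
        let path := if ch = 'N' then pvBranchA path (-1, 0) else path
        let path := if ch = 'E' then pvBranchA path (0, 1) else path
        let path := if ch = 'W' then pvBranchA path (0, -1) else path
        let path := if ch = 'S' then pvBranchA path (1, 0) else path
        path) [(Sr, Sc)]
  pvLastA path

-- ===== PORT B =====
-- B's four per-direction jump dictionaries jn/je/jw/js
structure pvJumps where
  jn : PySem.Dict (Int × Int) (Int × Int)
  je : PySem.Dict (Int × Int) (Int × Int)
  jw : PySem.Dict (Int × Int) (Int × Int)
  js : PySem.Dict (Int × Int) (Int × Int)
  deriving Repr, DecidableEq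

-- B's occupy(cell)
def pvOccupy (J : pvJumps) (cell : Int × Int) : pvJumps :=
  { jn := J.jn.insert cell (cell.1 - 1, cell.2)
    je := J.je.insert cell (cell.1, cell.2 + 1)
    jw := J.jw.insert cell (cell.1, cell.2 - 1)
    js := J.js.insert cell (cell.1 + 1, cell.2) }

-- B's 'while cell in jump: seen.append(cell); cell = jump[cell]'; fuel
-- jump.size + 1 always suffices (each hop visits a distinct key), so exact
def pvFindGo (fuel : Nat) (jump : PySem.Dict (Int × Int) (Int × Int))
    (cell : Int × Int) (seen : List (Int × Int)) : (Int × Int) × List (Int × Int) :=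
  match fuel with
  | 0 => (cell, seen)
  | f + 1 =>
    match jump.get? cell with
    | none => (cell, seen)
    | some nx => pvFindGo f jump nx (seen ++ [cell])

-- B's find: follow the chain, then compress every visited pointer to the result
def pvFind (jump : PySem.Dict (Int × Int) (Int × Int)) (cell : Int × Int) :
    (Int × Int) × PySem.Dict (Int × Int) (Int × Int) :=
  let r := pvFindGo (jump.size + 1) jump cell []
  (r.1, r.2.foldl (fun j p => j.insert p r.1) jump)

def end_position_alt (N : Int) (R : Int) (C : Int) (Sr : Int) (Sc : Int)
    (instructions : String) : Int × Int :=
  let chars := instructions.toList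
  let st : (Int × Int) × pvJumps :=
    (PySem.List.pyRange 0 N 1).foldl (fun st n =>
      match PySem.List.pyGet? chars n with
      | none => st  -- instructions[n] raises IndexError here; excluded by Pre_
      | some ch =>
        if ch = 'N' then
          let r := pvFind st.2.jn st.1
          (r.1, pvOccupy { st.2 with jn := r.2 } r.1)
        else if ch = 'E' then
          let r := pvFind st.2.je st.1
          (r.1, pvOccupy { st.2 with je := r.2 } r.1)
        else if ch = 'W' then
          let r := pvFind st.2.jw st.1
          (r.1, pvOccupy { st.2 with jw := r.2 } r.1)
        else if ch = 'S' then
          let r := pvFind st.2.js st.1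
          (r.1, pvOccupy { st.2 with js := r.2 } r.1)
        else st)
      ((Sr, Sc), pvOccupy ⟨.empty, .empty, .empty, .empty⟩ (Sr, Sc))
  st.1

-- ===== PRECONDITION & SPEC =====
-- Pre_ excludes exactly the inputs where A raises IndexError (instructions[n] with
-- N > len(instructions)); B raises there too.
def Pre_end_position (N : Int) (R : Int) (C : Int) (Sr : Int) (Sc : Int)
    (instructions : String) : Prop :=
  N ≤ (instructions.toList.length : Int)
instance (N : Int) (R : Int) (C : Int) (Sr : Int) (Sc : Int) (instructions : String) : Decidable (Pre_end_position N R C Sr Sc instructions) := by unfold Pre_end_position; infer_instance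

def pvWitness_end_position : Int × Int × Int × Int × Int × String := (4, 3, 3, 0, 0, "NEWS")

def Spec_end_position (N : Int) (R : Int) (C : Int) (Sr : Int) (Sc : Int) (instructions : String) (out : Int × Int) : Prop := out = end_position_alt N R C Sr Sc instructions
instance (N : Int) (R : Int) (C : Int) (Sr : Int) (Sc : Int) (instructions : String) (out : Int × Int) : Decidable (Spec_end_position N R C Sr Sc instructions out) := by unfold Spec_end_position; infer_instance

-- ===== CLAIM (what is proved, stated in full; the proofs are below) =====
def Claim_equal_end_position : Prop := ∀ (N : Int) (R : Int) (C : Int) (Sr : Int) (Sc : Int) (instructions : String), Dom_end_position N R C Sr Sc instructions → Pre_end_position N R C Sr Sc instructions → Spec_end_position N R C Sr Sc instructions (end_position N R C Sr Sc instructions)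

-- ===== LEMMAS AND PROOFS =====

-- ray arithmetic: the cell k steps from c in direction d
def pvAdd (c : Int × Int) (k : Nat) (d : Int × Int) : Int × Int :=
  (c.1 + k * d.1, c.2 + k * d.2)

-- invariant of one jump dictionary for direction d against A's path:
-- its keys are exactly the path cells, and each pointer jumps forward along the
-- ray over cells that are all on the path
def DirInv (j : PySem.Dict (Int × Int) (Int × Int)) (d : Int × Int)
    (path : List (Int × Int)) : Prop :=
  j.keys.Nodup ∧
  (∀ c, j.contains c = true ↔ c ∈ path) ∧
  (∀ c v, j.get? c = some v → ∃ k : Nat, 1 ≤ k ∧ v = pvAdd c k d ∧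
    ∀ i : Nat, 1 ≤ i → i < k → pvAdd c i d ∈ path)

-- the simulation relation between A's state (path) and B's state (cur, jumps)
def pvRel (path : List (Int × Int)) (st : (Int × Int) × pvJumps) : Prop :=
  path ≠ [] ∧ pvLastA path = st.1 ∧
  DirInv st.2.jn (-1, 0) path ∧ DirInv st.2.je (0, 1) path ∧
  DirInv st.2.jw (0, -1) path ∧ DirInv st.2.js (1, 0) path

theorem pvAdd_zero (c d : Int × Int) : pvAdd c 0 d = c := by simp [pvAdd]

theorem pvAdd_add (c d : Int × Int) (k i : Nat) :
    pvAdd (pvAdd c k d) i d = pvAdd c (k + i) d := by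
  simp only [pvAdd, Prod.mk.injEq]
  constructor <;> push_cast <;> ring

theorem pvAdd_one (c d : Int × Int) : pvAdd c 1 d = (c.1 + d.1, c.2 + d.2) := by
  simp [pvAdd]

theorem pvAdd_inj (c d : Int × Int) (hd : d ≠ (0, 0)) {i j : Nat}
    (h : pvAdd c i d = pvAdd c j d) : i = j := by
  simp only [pvAdd, Prod.mk.injEq] at h
  rcases h with ⟨h1, h2⟩
  have hd' : d.1 ≠ 0 ∨ d.2 ≠ 0 := by
    by_contra hc
    push Not at hc
    exact hd (Prod.ext hc.1 hc.2)
  rcases hd' with h | h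
  · have : (i : Int) = j := mul_right_cancel₀ h (by omega)
    exact_mod_cast this
  · have : (i : Int) = j := mul_right_cancel₀ h (by omega)
    exact_mod_cast this

-- pigeonhole: some cell within L.length steps along the ray is not in L
theorem ray_escape (d : Int × Int) (hd : d ≠ (0, 0)) (start : Int × Int)
    (L : List (Int × Int)) : ∃ K, K ≤ L.length ∧ pvAdd start K d ∉ L := by
  by_contra h
  push Not at h
  have hsub : (List.range (L.length + 1)).map (fun i => pvAdd start i d) ⊆ L := by
    intro x hx
    simp only [List.mem_map, List.mem_range] at hx
    rcases hx with ⟨i, hi, rfl⟩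
    exact h i (by omega)
  have hnd : ((List.range (L.length + 1)).map (fun i => pvAdd start i d)).Nodup :=
    (List.nodup_range).map (fun a b hab => pvAdd_inj start d hd hab)
  have hle := (hnd.subperm hsub).length_le
  simp at hle

-- A's skip loop reaches the first non-path cell along the ray
theorem skipA_spec (d : Int × Int) (path : List (Int × Int)) :
    ∀ (fuel : Nat) (start : Int × Int) (K : Nat),
      pvAdd start K d ∉ path → (∀ i, i < K → pvAdd start i d ∈ path) → K < fuel →
      pvSkipA fuel d path start = pvAdd start K d := by
  intro fuel
  induction fuel with
  | zero => intro start K _ _ h; omega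
  | succ f ih =>
    intro start K hK hbelow hfuel
    rw [pvSkipA]
    by_cases hmem : start ∈ path
    · have hK0 : K ≠ 0 := by
        rintro rfl; rw [pvAdd_zero] at hK; exact hK hmem
      have hKe : 1 + (K - 1) = K := by omega
      have e1 : pvAdd (pvAdd start 1 d) (K - 1) d = pvAdd start K d := by
        rw [pvAdd_add, hKe]
      have hrec := ih (pvAdd start 1 d) (K - 1)
        (by rw [e1]; exact hK)
        (by intro i hi; rw [pvAdd_add]; exact hbelow (1 + i) (by omega))
        (by omega)
      rw [if_pos hmem, ← pvAdd_one start d, hrec, e1]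
    · have hK0 : K = 0 := by
        by_contra hne
        exact hmem (by have := hbelow 0 (by omega); rwa [pvAdd_zero] at this)
      rw [if_neg hmem, hK0, pvAdd_zero]

-- B's pointer chase reaches the same first non-path cell, and every visited
-- pointer lies strictly before it on the ray
theorem findGo_spec (j : PySem.Dict (Int × Int) (Int × Int)) (d : Int × Int)
    (path : List (Int × Int)) (hinv : DirInv j d path) :
    ∀ (fuel : Nat) (c0 : Int × Int) (K : Nat) (seen : List (Int × Int)),
      pvAdd c0 K d ∉ path → (∀ i, i < K → pvAdd c0 i d ∈ path) → K < fuel →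
      (pvFindGo fuel j c0 seen).1 = pvAdd c0 K d ∧
      ∀ p ∈ (pvFindGo fuel j c0 seen).2, p ∈ seen ∨ ∃ i, i < K ∧ p = pvAdd c0 i d := by
  obtain ⟨hnd, hcont, hptr⟩ := hinv
  intro fuel
  induction fuel with
  | zero => intro c0 K seen _ _ h; omega
  | succ f ih =>
    intro c0 K seen hK hbelow hfuel
    rw [pvFindGo]
    cases hg : j.get? c0 with
    | none =>
      have hc0 : c0 ∉ path := by
        rw [← hcont c0]
        intro hc
        rw [PySem.Dict.contains_eq_isSome_get?, hg] at hc
        simp at hc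
      have hK0 : K = 0 := by
        by_contra hne
        exact hc0 (by have := hbelow 0 (by omega); rwa [pvAdd_zero] at this)
      subst hK0
      rw [pvAdd_zero]
      exact ⟨rfl, fun p hp => Or.inl hp⟩
    | some v =>
      have hc0 : c0 ∈ path := by
        rw [← hcont c0, PySem.Dict.contains_eq_isSome_get?, hg]; rfl
      have hK0 : K ≠ 0 := by
        rintro rfl; rw [pvAdd_zero] at hK; exact hK hc0
      obtain ⟨k, hk1, hv, hmid⟩ := hptr c0 v hg
      have hkK : k ≤ K := by
        by_contra hlt
        exact hK (by
          have := hmid K (by omega) (by omega)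
          exact this)
      have harith : pvAdd v (K - k) d = pvAdd c0 K d := by
        rw [hv, pvAdd_add]; congr 1; omega
      obtain ⟨h1, h2⟩ := ih v (K - k) (seen ++ [c0])
        (by rw [harith]; exact hK)
        (by intro i hi
            rw [hv, pvAdd_add]
            exact hbelow (k + i) (by omega))
        (by omega)
      refine ⟨by rw [h1, harith], ?_⟩
      intro p hp
      rcases h2 p hp with hs | ⟨i, hi, rfl⟩
      · rcases List.mem_append.mp hs with hs | hs
        · exact Or.inl hs
        · have : p = c0 := by simpa using hs
          subst this
          exact Or.inr ⟨0, by omega, (pvAdd_zero _ _).symm⟩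
      · exact Or.inr ⟨k + i, by omega, by rw [hv, pvAdd_add]⟩

-- overwriting an existing key with a farther forward pointer keeps DirInv
theorem dirinv_insert (j : PySem.Dict (Int × Int) (Int × Int)) (d : Int × Int)
    (path : List (Int × Int)) (hinv : DirInv j d path) (p res : Int × Int)
    (hp : p ∈ path) (m : Nat) (hm : 1 ≤ m) (hres : res = pvAdd p m d)
    (hmid : ∀ t, 1 ≤ t → t < m → pvAdd p t d ∈ path) :
    DirInv (j.insert p res) d path := by
  obtain ⟨hnd, hcont, hptr⟩ := hinv
  refine ⟨PySem.Dict.nodup_keys_insert _ _ _ hnd, ?_, ?_⟩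
  · intro c
    rw [PySem.Dict.contains_insert]
    constructor
    · intro h
      rcases Bool.or_eq_true_iff.mp h with h | h
      · have : c = p := by simpa using h
        subst this; exact hp
      · exact (hcont c).mp h
    · intro h
      rw [Bool.or_eq_true_iff]
      exact Or.inr ((hcont c).mpr h)
  · intro c v hg
    rw [PySem.Dict.get?_insert] at hg
    by_cases hc : c = p
    · subst hc
      rw [if_pos rfl] at hg
      exact ⟨m, hm, by rw [← hres]; exact (Option.some.injEq _ _ ▸ hg).symm, hmid⟩
    · rw [if_neg hc] at hg
      exact hptr c v hg

-- path compression: rewriting all visited pointers to the result keeps DirInv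
theorem dirinv_compress (d : Int × Int) (path : List (Int × Int)) (res : Int × Int)
    (seen : List (Int × Int))
    (h : ∀ p ∈ seen, p ∈ path ∧ ∃ m, 1 ≤ m ∧ res = pvAdd p m d ∧
      ∀ t, 1 ≤ t → t < m → pvAdd p t d ∈ path) :
    ∀ j, DirInv j d path → DirInv (seen.foldl (fun j p => j.insert p res) j) d path := by
  induction seen with
  | nil => intro j hj; exact hj
  | cons p rest ih =>
    intro j hj
    rw [List.foldl_cons]
    obtain ⟨hp, m, hm, hres, hmid⟩ := h p (List.mem_cons_self)
    exact ih (fun q hq => h q (List.mem_cons_of_mem _ hq)) _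
      (dirinv_insert j d path hj p res hp m hm hres hmid)

-- occupying a fresh cell: insert it with a one-step pointer, extend the path
theorem dirinv_extend (j : PySem.Dict (Int × Int) (Int × Int)) (d : Int × Int)
    (path : List (Int × Int)) (hinv : DirInv j d path) (new v : Int × Int)
    (hnew : new ∉ path) (hv : v = pvAdd new 1 d) :
    DirInv (j.insert new v) d (path ++ [new]) := by
  obtain ⟨hnd, hcont, hptr⟩ := hinv
  refine ⟨PySem.Dict.nodup_keys_insert _ _ _ hnd, ?_, ?_⟩
  · intro c
    rw [PySem.Dict.contains_insert, List.mem_append]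
    constructor
    · intro h
      rcases Bool.or_eq_true_iff.mp h with h | h
      · have : c = new := by simpa using h
        subst this; exact Or.inr (by simp)
      · exact Or.inl ((hcont c).mp h)
    · intro h
      rw [Bool.or_eq_true_iff]
      rcases h with h | h
      · exact Or.inr ((hcont c).mpr h)
      · have : c = new := by simpa using h
        subst this; simp
  · intro c w hg
    rw [PySem.Dict.get?_insert] at hg
    by_cases hc : c = new
    · subst hc
      rw [if_pos rfl] at hg
      refine ⟨1, le_refl 1, ?_, by intro t ht1 ht2; omega⟩
      rw [← hv]
      exact (Option.some.injEq _ _ ▸ hg).symm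
    · rw [if_neg hc] at hg
      obtain ⟨k, hk1, hw, hmid⟩ := hptr c w hg
      exact ⟨k, hk1, hw, fun i h1 h2 => List.mem_append.mpr (Or.inl (hmid i h1 h2))⟩

theorem pvLastA_mem (path : List (Int × Int)) (h : path ≠ []) : pvLastA path ∈ path := by
  unfold pvLastA
  rw [List.getLast?_eq_some_getLast h]
  exact List.getLast_mem h

theorem pvLastA_concat (l : List (Int × Int)) (a : Int × Int) :
    pvLastA (l ++ [a]) = a := by
  simp [pvLastA]

theorem dict_size_eq_keys_length (j : PySem.Dict (Int × Int) (Int × Int)) :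
    j.size = j.keys.length := by
  simp [PySem.Dict.size, PySem.Dict.keys]

-- the crux: on a state satisfying the invariant, B's find (with compression)
-- returns exactly the cell A's skip loop reaches, and DirInv survives
theorem find_eq_skip (d : Int × Int) (hd : d ≠ (0, 0)) (path : List (Int × Int))
    (j : PySem.Dict (Int × Int) (Int × Int)) (hinv : DirInv j d path)
    (cur : Int × Int) (hcur : cur ∈ path) :
    (pvFind j cur).1 = pvSkipA (path.length + 1) d path (cur.1 + d.1, cur.2 + d.2) ∧
    (pvFind j cur).1 ∉ path ∧ DirInv (pvFind j cur).2 d path := by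
  -- the minimal free offset K0 along the ray from cur
  have hex : ∃ K, pvAdd cur K d ∉ path := by
    obtain ⟨K, _, hK⟩ := ray_escape d hd cur path
    exact ⟨K, hK⟩
  classical
  set K0 := Nat.find hex with hK0def
  have hK0 : pvAdd cur K0 d ∉ path := Nat.find_spec hex
  have hbelow : ∀ i, i < K0 → pvAdd cur i d ∈ path := by
    intro i hi
    have := Nat.find_min hex hi
    simpa using this
  have hK0pos : 1 ≤ K0 := by
    rcases Nat.eq_zero_or_pos K0 with h | h
    · exfalso; rw [h, pvAdd_zero] at hK0; exact hK0 hcur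
    · exact h
  have hK0path : K0 ≤ path.length := by
    obtain ⟨K, hKle, hK⟩ := ray_escape d hd cur path
    exact le_trans (Nat.find_min' hex hK) hKle
  have hK0keys : K0 ≤ j.size := by
    obtain ⟨K, hKle, hK⟩ := ray_escape d hd cur j.keys
    have : pvAdd cur K d ∉ path := by
      intro hmem
      exact hK ((PySem.Dict.contains_iff_mem_keys _ _).mp ((hinv.2.1 _).mpr hmem))
    rw [dict_size_eq_keys_length]
    exact le_trans (Nat.find_min' hex this) hKle
  -- A's side
  have hA : pvSkipA (path.length + 1) d path (cur.1 + d.1, cur.2 + d.2) = pvAdd cur K0 d := by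
    have hKe : 1 + (K0 - 1) = K0 := by omega
    have e1 : pvAdd (pvAdd cur 1 d) (K0 - 1) d = pvAdd cur K0 d := by
      rw [pvAdd_add, hKe]
    have hrec := skipA_spec d path (path.length + 1) (pvAdd cur 1 d) (K0 - 1)
      (by rw [e1]; exact hK0)
      (by intro i hi; rw [pvAdd_add]; exact hbelow (1 + i) (by omega))
      (by omega)
    rw [← pvAdd_one cur d, hrec, e1]
  -- B's side
  obtain ⟨hB1, hB2⟩ := findGo_spec j d path hinv (j.size + 1) cur K0 [] hK0 hbelow (by omega)
  unfold pvFind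
  refine ⟨by rw [hB1, hA], by rw [hB1]; exact hK0, ?_⟩
  apply dirinv_compress d path _ _ ?_ j hinv
  intro p hp
  rcases hB2 p hp with h | ⟨i, hi, rfl⟩
  · simp at h
  · refine ⟨hbelow i hi, K0 - i, by omega, ?_, ?_⟩
    · rw [hB1, pvAdd_add]
      congr 1
      omega
    · intro t ht1 ht2
      rw [pvAdd_add]
      exact hbelow (i + t) (by omega)

-- one simulated move preserves the relation (for any of the four directions)
theorem pvRel_move (d : Int × Int) (hd : d ≠ (0, 0)) (path : List (Int × Int))
    (st : (Int × Int) × pvJumps) (h : pvRel path st)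
    (j : PySem.Dict (Int × Int) (Int × Int)) (hj : DirInv j d path) :
    (pvFind j st.1).1 = pvSkipA (path.length + 1) d path
      ((pvLastA path).1 + d.1, (pvLastA path).2 + d.2) ∧
    (pvFind j st.1).1 ∉ path ∧ DirInv (pvFind j st.1).2 d path := by
  obtain ⟨hne, hlast, _⟩ := h
  have hcur : st.1 ∈ path := hlast ▸ pvLastA_mem path hne
  have := find_eq_skip d hd path j hj st.1 hcur
  rwa [hlast]

-- pvRel is preserved by a parallel fold
theorem foldl_rel {α β γ : Type} (R : α → β → Prop) (f : α → γ → α) (g : β → γ → β)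
    (h : ∀ a b x, R a b → R (f a x) (g b x)) :
    ∀ (l : List γ) (a : α) (b : β), R a b → R (l.foldl f a) (l.foldl g b) := by
  intro l
  induction l with
  | nil => intro a b hab; exact hab
  | cons x xs ih => intro a b hab; exact ih (f a x) (g b x) (h a b x hab)


theorem dirinv_empty (d : Int × Int) : DirInv PySem.Dict.empty d [] := by
  refine ⟨?_, ?_, ?_⟩
  · simp [PySem.Dict.keys, PySem.Dict.empty]
  · intro c
    simp [PySem.Dict.contains_empty]
  · intro c v hg
    simp [PySem.Dict.get?_empty] at hg

-- landing on a fresh cell: append it to the path, give it one-step pointers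
theorem pvRel_concat (path : List (Int × Int)) (res : Int × Int) (hNot : res ∉ path)
    (JJ : pvJumps)
    (hn : DirInv JJ.jn (-1, 0) path) (he : DirInv JJ.je (0, 1) path)
    (hw : DirInv JJ.jw (0, -1) path) (hs : DirInv JJ.js (1, 0) path) :
    pvRel (path ++ [res]) (res, pvOccupy JJ res) := by
  refine ⟨by simp, pvLastA_concat _ _, ?_, ?_, ?_, ?_⟩
  · exact dirinv_extend _ _ _ hn res _ hNot
      (by simp only [pvAdd, Prod.mk.injEq]; constructor <;> push_cast <;> ring)
  · exact dirinv_extend _ _ _ he res _ hNot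
      (by simp only [pvAdd, Prod.mk.injEq]; constructor <;> push_cast <;> ring)
  · exact dirinv_extend _ _ _ hw res _ hNot
      (by simp only [pvAdd, Prod.mk.injEq]; constructor <;> push_cast <;> ring)
  · exact dirinv_extend _ _ _ hs res _ hNot
      (by simp only [pvAdd, Prod.mk.injEq]; constructor <;> push_cast <;> ring)

-- one iteration of the two folds preserves the relation
theorem step_preserves (chars : List Char) :
    ∀ (path : List (Int × Int)) (st : (Int × Int) × pvJumps) (n : Int),
      pvRel path st →
      pvRel
        (match PySem.List.pyGet? chars n with
         | none => path
         | some ch =>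
           let path := if ch = 'N' then pvBranchA path (-1, 0) else path
           let path := if ch = 'E' then pvBranchA path (0, 1) else path
           let path := if ch = 'W' then pvBranchA path (0, -1) else path
           let path := if ch = 'S' then pvBranchA path (1, 0) else path
           path)
        (match PySem.List.pyGet? chars n with
         | none => st
         | some ch =>
           if ch = 'N' then
             let r := pvFind st.2.jn st.1
             (r.1, pvOccupy { st.2 with jn := r.2 } r.1)
           else if ch = 'E' then
             let r := pvFind st.2.je st.1
             (r.1, pvOccupy { st.2 with je := r.2 } r.1)
           else if ch = 'W' then
             let r := pvFind st.2.jw st.1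
             (r.1, pvOccupy { st.2 with jw := r.2 } r.1)
           else if ch = 'S' then
             let r := pvFind st.2.js st.1
             (r.1, pvOccupy { st.2 with js := r.2 } r.1)
           else st) := by
  intro path st n h
  cases hg : PySem.List.pyGet? chars n with
  | none => exact h
  | some ch =>
    obtain ⟨hne, hlast, hjn, hje, hjw, hjs⟩ := h
    by_cases h1 : ch = 'N'
    · subst h1
      have c1 : (('N' : Char) = 'E') = False := by decide
      have c2 : (('N' : Char) = 'W') = False := by decide
      have c3 : (('N' : Char) = 'S') = False := by decide
      simp only [if_true, c1, c2, c3, if_false, pvBranchA]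
      obtain ⟨hEq, hNot, hInv⟩ :=
        pvRel_move (-1, 0) (by decide) path st ⟨hne, hlast, hjn, hje, hjw, hjs⟩ st.2.jn hjn
      rw [← hEq]
      exact pvRel_concat path _ hNot { st.2 with jn := (pvFind st.2.jn st.1).2 }
        hInv hje hjw hjs
    · by_cases h2 : ch = 'E'
      · subst h2
        have c1 : (('E' : Char) = 'N') = False := by decide
        have c2 : (('E' : Char) = 'W') = False := by decide
        have c3 : (('E' : Char) = 'S') = False := by decide
        simp only [if_true, c1, c2, c3, if_false, pvBranchA]
        obtain ⟨hEq, hNot, hInv⟩ :=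
          pvRel_move (0, 1) (by decide) path st ⟨hne, hlast, hjn, hje, hjw, hjs⟩ st.2.je hje
        rw [← hEq]
        exact pvRel_concat path _ hNot { st.2 with je := (pvFind st.2.je st.1).2 }
          hjn hInv hjw hjs
      · by_cases h3 : ch = 'W'
        · subst h3
          have c1 : (('W' : Char) = 'N') = False := by decide
          have c2 : (('W' : Char) = 'E') = False := by decide
          have c3 : (('W' : Char) = 'S') = False := by decide
          simp only [if_true, c1, c2, c3, if_false, pvBranchA]
          obtain ⟨hEq, hNot, hInv⟩ :=
            pvRel_move (0, -1) (by decide) path st ⟨hne, hlast, hjn, hje, hjw, hjs⟩ st.2.jw hjw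
          rw [← hEq]
          exact pvRel_concat path _ hNot { st.2 with jw := (pvFind st.2.jw st.1).2 }
            hjn hje hInv hjs
        · by_cases h4 : ch = 'S'
          · subst h4
            have c1 : (('S' : Char) = 'N') = False := by decide
            have c2 : (('S' : Char) = 'E') = False := by decide
            have c3 : (('S' : Char) = 'W') = False := by decide
            simp only [if_true, c1, c2, c3, if_false, pvBranchA]
            obtain ⟨hEq, hNot, hInv⟩ :=
              pvRel_move (1, 0) (by decide) path st ⟨hne, hlast, hjn, hje, hjw, hjs⟩ st.2.js hjs
            rw [← hEq]
            exact pvRel_concat path _ hNot { st.2 with js := (pvFind st.2.js st.1).2 }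
              hjn hje hjw hInv
          · simp only [if_neg h1, if_neg h2, if_neg h3, if_neg h4]
            exact ⟨hne, hlast, hjn, hje, hjw, hjs⟩

-- ===== VERDICT (by name: the statement is the Claim_ definition above) =====
theorem end_position_spec : Claim_equal_end_position := by
  intro N R C Sr Sc instructions _dom _pre
  unfold Spec_end_position end_position end_position_alt
  have hinit : pvRel [(Sr, Sc)]
      ((Sr, Sc), pvOccupy ⟨.empty, .empty, .empty, .empty⟩ (Sr, Sc)) := by
    have h := pvRel_concat [] (Sr, Sc) (by simp) ⟨.empty, .empty, .empty, .empty⟩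
      (dirinv_empty _) (dirinv_empty _) (dirinv_empty _) (dirinv_empty _)
    simpa using h
  have hfin := foldl_rel pvRel _ _ (step_preserves instructions.toList)
    (PySem.List.pyRange 0 N 1) _ _ hinit
  exact hfin.2.1
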